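-- pv_equiv track=rewrite | github.com/rsm-halyu/capstone_dashboards | streamlit_app.py | classify_sentiment_row
-- ===== SOURCE A (Python) =====
-- def classify_sentiment_row(row):
--     sentiments = [
--         row.get('text_sentiment', 'None'),
--         row.get('audio_sentiment', 'None'),
--         row.get('video_sentiment', 'None'),
--         row.get('ocr_sentiment', 'None')
--     ]
--     if all(s == 'Positive' for s in sentiments):
--         return 'All Positive'
--     elif all(s == 'Negative' for s in sentiments):
--         return 'All Negative'
--     elif all(s == 'Neutral' for s in sentiments):
--         return 'All Neutral'
--     else:
--         return 'Mixed'
-- ===== SOURCE B (Python) =====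
-- _LABELS = {'Positive': 'All Positive', 'Negative': 'All Negative', 'Neutral': 'All Neutral'}
--
-- def classify_sentiment_row(row):
--     sentiments = [
--         row.get('text_sentiment', 'None'),
--         row.get('audio_sentiment', 'None'),
--         row.get('video_sentiment', 'None'),
--         row.get('ocr_sentiment', 'None')
--     ]
--     unique = set(sentiments)
--     if len(unique) == 1:
--         return _LABELS.get(next(iter(unique)), 'Mixed')
--     return 'Mixed'
-- ===== Notes on version B (the rewrite author's own statement) =====
-- stated objective: simpler
-- what changed: Replaces the three sequential all()-scans over the sentiments with a single set construction plus one dict lookup of the unique value (defaulting to 'Mixed').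
import Mathlib
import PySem

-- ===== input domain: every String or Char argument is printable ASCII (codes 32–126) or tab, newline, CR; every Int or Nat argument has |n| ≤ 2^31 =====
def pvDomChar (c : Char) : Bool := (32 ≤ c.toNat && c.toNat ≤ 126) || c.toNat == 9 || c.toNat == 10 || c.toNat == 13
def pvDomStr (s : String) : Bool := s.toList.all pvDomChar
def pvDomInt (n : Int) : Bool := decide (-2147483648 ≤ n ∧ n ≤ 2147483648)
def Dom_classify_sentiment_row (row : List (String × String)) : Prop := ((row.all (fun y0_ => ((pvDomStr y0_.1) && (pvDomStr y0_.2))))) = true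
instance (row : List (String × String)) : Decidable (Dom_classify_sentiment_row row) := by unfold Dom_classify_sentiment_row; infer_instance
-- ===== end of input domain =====

-- B replaces A's three sequential all()-scans with one set construction plus a dict lookup (objective: simpler).

-- ===== PORT A =====
def classify_sentiment_row (row : List (String × String)) : String :=
  let d := PySem.Dict.mk row
  let sentiments := [d.getD "text_sentiment" "None", d.getD "audio_sentiment" "None",
                     d.getD "video_sentiment" "None", d.getD "ocr_sentiment" "None"]
  if sentiments.all (fun s => s == "Positive") then "All Positive"
  else if sentiments.all (fun s => s == "Negative") then "All Negative"
  else if sentiments.all (fun s => s == "Neutral") then "All Neutral"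
  else "Mixed"

-- ===== PORT B =====
def pvLabels : PySem.Dict String String :=
  PySem.Dict.mk [("Positive", "All Positive"), ("Negative", "All Negative"), ("Neutral", "All Neutral")]

def classify_sentiment_row_alt (row : List (String × String)) : String :=
  let d := PySem.Dict.mk row
  let sentiments := [d.getD "text_sentiment" "None", d.getD "audio_sentiment" "None",
                     d.getD "video_sentiment" "None", d.getD "ocr_sentiment" "None"]
  let unique := PySem.Set.ofList sentiments
  if unique.length == 1 then pvLabels.getD (unique.headD "") "Mixed"
  else "Mixed"

-- ===== PRECONDITION & SPEC =====
def Spec_classify_sentiment_row (row : List (String × String)) (out : String) : Prop := out = classify_sentiment_row_alt row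
instance (row : List (String × String)) (out : String) : Decidable (Spec_classify_sentiment_row row out) := by unfold Spec_classify_sentiment_row; infer_instance

-- ===== CLAIM (what is proved, stated in full; the proofs are below) =====
def Claim_equal_classify_sentiment_row : Prop := ∀ (row : List (String × String)), Dom_classify_sentiment_row row → Spec_classify_sentiment_row row (classify_sentiment_row row)

-- ===== LEMMAS AND PROOFS =====

-- the core agreement, stated over the four arbitrary sentiment strings
theorem pv_core (a b c d : String) :
    (if [a,b,c,d].all (fun s => s == "Positive") then "All Positive"
     else if [a,b,c,d].all (fun s => s == "Negative") then "All Negative"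
     else if [a,b,c,d].all (fun s => s == "Neutral") then "All Neutral"
     else "Mixed")
    = (if (PySem.Set.ofList [a,b,c,d]).length == 1
       then pvLabels.getD ((PySem.Set.ofList [a,b,c,d]).headD "") "Mixed"
       else "Mixed") := by
  by_cases h : b = a ∧ c = a ∧ d = a
  · obtain ⟨hb, hc, hd⟩ := h; rw [hb, hc, hd]
    simp only [PySem.Set.ofList, PySem.Set.add, List.foldl]
    by_cases h1 : a = "Positive"
    · subst h1; simp [pvLabels, PySem.Dict.getD, PySem.Dict.get?]
    · by_cases h2 : a = "Negative"
      · subst h2; simp [pvLabels, PySem.Dict.getD, PySem.Dict.get?, List.find?]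
      · by_cases h3 : a = "Neutral"
        · subst h3; simp [pvLabels, PySem.Dict.getD, PySem.Dict.get?, List.find?]
        · have e1 : ("Positive" == a) = false := beq_eq_false_iff_ne.mpr (Ne.symm h1)
          have e2 : ("Negative" == a) = false := beq_eq_false_iff_ne.mpr (Ne.symm h2)
          have e3 : ("Neutral" == a) = false := beq_eq_false_iff_ne.mpr (Ne.symm h3)
          simp [pvLabels, PySem.Dict.getD, PySem.Dict.get?, List.find?, h1, h2, h3, e1, e2, e3]
  · have hxne : ∃ x ∈ [a, b, c, d], x ≠ a := by
      by_cases hb : b = a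
      · by_cases hc : c = a
        · exact ⟨d, by simp, fun hd => h ⟨hb, hc, hd⟩⟩
        · exact ⟨c, by simp, hc⟩
      · exact ⟨b, by simp, hb⟩
    obtain ⟨x, hxmem, hxa⟩ := hxne
    have hlen : (PySem.Set.ofList [a, b, c, d]).length ≠ 1 := by
      intro hl
      obtain ⟨y, hy⟩ := List.length_eq_one_iff.mp hl
      have ha' : a ∈ PySem.Set.ofList [a, b, c, d] := (PySem.Set.mem_ofList _ _).mpr (by simp)
      have hx' : x ∈ PySem.Set.ofList [a, b, c, d] := (PySem.Set.mem_ofList _ _).mpr hxmem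
      rw [hy] at ha' hx'
      simp at ha' hx'
      exact hxa (hx'.trans ha'.symm)
    have hA : ∀ v : String, ¬ (a = v ∧ b = v ∧ c = v ∧ d = v) := by
      rintro v ⟨h1, h2, h3, h4⟩
      exact h ⟨h2.trans h1.symm, h3.trans h1.symm, h4.trans h1.symm⟩
    simp [List.all, hA "Positive", hA "Negative", hA "Neutral", hlen]

-- ===== VERDICT (by name: the statement is the Claim_ definition above) =====
theorem classify_sentiment_row_spec : Claim_equal_classify_sentiment_row := by
  intro row _
  unfold Spec_classify_sentiment_row classify_sentiment_row classify_sentiment_row_alt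
  exact pv_core _ _ _ _
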